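-- pv_equiv track=rewrite | github.com/malo-renaudin/Hard-CBR-RNN | preporc_and_tok.py | chunked_text_generator
-- ===== SOURCE A (Python) =====
-- from typing import Generator, List, Iterator
--
-- def chunked_text_generator(dataset_split, chunk_size: int = 1000) -> Generator[List[str], None, None]:
--     """
--     Generate chunks of text from dataset to avoid loading all at once
--     """
--     texts = []
--     for item in dataset_split:
--         if item["text"].strip():
--             texts.append(item["text"])
--             if len(texts) >= chunk_size:
--                 yield texts
--                 texts = []
--     if texts:  # yield remaining texts
--         yield texts
-- ===== SOURCE B (Python) =====
-- def chunked_text_generator(dataset_split, chunk_size: int = 1000):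
--     """Filter once into a list, then yield successive slices of it."""
--     texts = [item["text"] for item in dataset_split if item["text"].strip()]
--     while texts:
--         yield texts[:chunk_size]
--         texts = texts[chunk_size:]
-- ===== Notes on version B (the rewrite author's own statement) =====
-- stated objective: simpler
-- what changed: A interleaves filtering, an accumulator and a length check in one stateful loop; B first filters all non-empty texts with a comprehension and then emits successive slices texts[:chunk_size] / texts[chunk_size:], with no accumulator or counter.
-- outside the precondition, e.g. on chunked_text_generator([{'text': 'a'}], 0): A returns [['a']], B does not finish within the time limit; on chunked_text_generator([{'text': 'a'}], -1): A returns [['a']], B does not finish within the time limit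
import Mathlib
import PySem

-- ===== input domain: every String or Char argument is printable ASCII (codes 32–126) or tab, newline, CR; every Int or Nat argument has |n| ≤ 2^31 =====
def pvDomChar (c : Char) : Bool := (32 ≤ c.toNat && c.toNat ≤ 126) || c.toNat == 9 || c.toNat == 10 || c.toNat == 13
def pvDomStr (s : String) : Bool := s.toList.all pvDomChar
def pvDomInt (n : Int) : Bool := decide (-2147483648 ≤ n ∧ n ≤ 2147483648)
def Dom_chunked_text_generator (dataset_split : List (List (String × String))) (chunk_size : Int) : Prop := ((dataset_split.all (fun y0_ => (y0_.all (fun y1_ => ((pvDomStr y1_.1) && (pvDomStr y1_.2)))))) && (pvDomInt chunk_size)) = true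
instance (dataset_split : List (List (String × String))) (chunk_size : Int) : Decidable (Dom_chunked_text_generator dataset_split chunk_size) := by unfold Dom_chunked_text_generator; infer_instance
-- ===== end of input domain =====

-- B replaces A's stateful accumulate-and-flush loop by a filter comprehension followed by
-- successive slicing (simpler decomposition). Pre_ excludes chunk_size ≤ 0, where A yields
-- singleton chunks by accident of the >= check while B's slicing loop never terminates (when
-- any non-blank text exists), and items without a "text" key, where both Pythons raise KeyError.


-- item["text"]: first-match association-list lookup; total form (default "") — Pre_ guarantees the key exists
def pvItemText (item : List (String × String)) : String :=
  (PySem.Dict.get? (PySem.Dict.mk item) "text").getD ""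

-- ===== PORT A =====
def chunked_text_generator (dataset_split : List (List (String × String))) (chunk_size : Int) : List (List String) :=
  let st := dataset_split.foldl
    (fun (st : List String × List (List String)) item =>
      let t := pvItemText item
      if PySem.Str.strip t ≠ "" then
        let texts := st.1 ++ [t]
        if chunk_size ≤ (texts.length : Int) then ([], st.2 ++ [texts])
        else (texts, st.2)
      else st)
    ([], [])
  if st.1 ≠ [] then st.2 ++ [st.1] else st.2

-- ===== PORT B =====
-- the comprehension: [item["text"] for item in dataset_split if item["text"].strip()]
def pvAltTexts (dataset_split : List (List (String × String))) : List String :=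
  dataset_split.filterMap (fun item =>
    let t := pvItemText item
    if PySem.Str.strip t ≠ "" then some t else none)

-- the slicing loop: while texts: yield texts[:cs]; texts = texts[cs:]
-- (for cs ≤ 0 the Python loop never terminates; the guard returning [] only makes the Lean
--  recursion total — those inputs are outside Pre_)
def pvAltLoop (cs : Int) (texts : List String) : List (List String) :=
  if texts = [] then []
  else if cs ≤ 0 then []
  else PySem.List.slice texts none (some cs) :: pvAltLoop cs (PySem.List.slice texts (some cs) none)
termination_by texts.length
decreasing_by
  rename_i hnil hne
  simp only [PySem.List.slice_some_none, List.length_drop]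
  have hx : texts.length ≠ 0 := fun h0 => hnil (List.eq_nil_of_length_eq_zero h0)
  have h2 : 1 ≤ PySem.List.clampIdx texts.length cs := by
    unfold PySem.List.clampIdx; split <;> omega
  omega

def chunked_text_generator_alt (dataset_split : List (List (String × String))) (chunk_size : Int) : List (List String) :=
  pvAltLoop chunk_size (pvAltTexts dataset_split)

-- ===== PRECONDITION & SPEC =====
-- Pre_ excludes (a) chunk_size ≤ 0 when some item has a non-blank text: A still returns there
-- (each kept text becomes its own chunk, an accident of the >= flush check) while B's slicing
-- loop diverges; (b) items missing the "text" key, where both Pythons raise KeyError.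
def Pre_chunked_text_generator (dataset_split : List (List (String × String))) (chunk_size : Int) : Prop :=
  (0 < chunk_size ∨ ∀ item ∈ dataset_split,
      PySem.Str.strip ((PySem.Dict.get? (PySem.Dict.mk item) "text").getD "") = "") ∧
  ∀ item ∈ dataset_split, "text" ∈ item.map Prod.fst
instance (dataset_split : List (List (String × String))) (chunk_size : Int) : Decidable (Pre_chunked_text_generator dataset_split chunk_size) := by unfold Pre_chunked_text_generator; infer_instance

def pvWitness_chunked_text_generator : (List (List (String × String))) × Int :=
  ([[("text", "hello")], [("text", "  ")], [("text", "world")]], 1)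

def Spec_chunked_text_generator (dataset_split : List (List (String × String))) (chunk_size : Int) (out : List (List String)) : Prop := out = chunked_text_generator_alt dataset_split chunk_size
instance (dataset_split : List (List (String × String))) (chunk_size : Int) (out : List (List String)) : Decidable (Spec_chunked_text_generator dataset_split chunk_size out) := by unfold Spec_chunked_text_generator; infer_instance

-- ===== CLAIM (what is proved, stated in full; the proofs are below) =====
def Claim_equal_chunked_text_generator : Prop := ∀ (dataset_split : List (List (String × String))) (chunk_size : Int), Dom_chunked_text_generator dataset_split chunk_size → Pre_chunked_text_generator dataset_split chunk_size → Spec_chunked_text_generator dataset_split chunk_size (chunked_text_generator dataset_split chunk_size)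

-- ===== LEMMAS AND PROOFS =====

-- the body of A's for-loop, named for the lemmas
theorem pvAltLoop_eq (cs : Int) (texts : List String) : pvAltLoop cs texts =
    if texts = [] then []
    else if cs ≤ 0 then []
    else PySem.List.slice texts none (some cs) :: pvAltLoop cs (PySem.List.slice texts (some cs) none) := by
  rw [pvAltLoop.eq_def]

def pvStepA (cs : Int) (st : List String × List (List String)) (item : List (String × String)) :
    List String × List (List String) :=
  let t := pvItemText item
  if PySem.Str.strip t ≠ "" then
    let texts := st.1 ++ [t]
    if cs ≤ (texts.length : Int) then ([], st.2 ++ [texts])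
    else (texts, st.2)
  else st

-- A's trailing 'if texts: yield texts'
def pvFinish (st : List String × List (List String)) : List (List String) :=
  if st.1 ≠ [] then st.2 ++ [st.1] else st.2

theorem pvStepA_skip (cs : Int) (st : List String × List (List String))
    (item : List (String × String)) (h : PySem.Str.strip (pvItemText item) = "") :
    pvStepA cs st item = st := by
  simp [pvStepA, h]

theorem pvStepA_keep (cs : Int) (st : List String × List (List String))
    (item : List (String × String)) (h : PySem.Str.strip (pvItemText item) ≠ "") :
    pvStepA cs st item =
      if cs ≤ ((st.1 ++ [pvItemText item]).length : Int) then ([], st.2 ++ [st.1 ++ [pvItemText item]])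
      else (st.1 ++ [pvItemText item], st.2) := by
  simp [pvStepA, h]

theorem pvAltTexts_skip (item : List (String × String)) (ds : List (List (String × String)))
    (h : PySem.Str.strip (pvItemText item) = "") :
    pvAltTexts (item :: ds) = pvAltTexts ds := by
  simp [pvAltTexts, h]

theorem pvAltTexts_keep (item : List (String × String)) (ds : List (List (String × String)))
    (h : PySem.Str.strip (pvItemText item) ≠ "") :
    pvAltTexts (item :: ds) = pvItemText item :: pvAltTexts ds := by
  simp [pvAltTexts, h]

-- chunk layout produced by A's loop from pending buffer `texts` over remaining kept texts `l`
def pvChunksFrom (cs : Int) (texts : List String) : List String → List (List String)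
  | [] => if texts = [] then [] else [texts]
  | t :: l =>
      if cs ≤ ((texts.length : Int) + 1) then (texts ++ [t]) :: pvChunksFrom cs [] l
      else pvChunksFrom cs (texts ++ [t]) l

theorem pvFoldA_chunksFrom (cs : Int) (ds : List (List (String × String)))
    (texts : List String) (out : List (List String)) :
    pvFinish (ds.foldl (pvStepA cs) (texts, out)) = out ++ pvChunksFrom cs texts (pvAltTexts ds) := by
  induction ds generalizing texts out with
  | nil => simp only [List.foldl_nil, pvFinish, pvAltTexts, List.filterMap_nil, pvChunksFrom]
           split <;> simp_all
  | cons item ds ih =>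
    rw [List.foldl_cons]
    by_cases hkeep : PySem.Str.strip (pvItemText item) = ""
    · rw [pvStepA_skip cs (texts, out) item hkeep, ih, pvAltTexts_skip item ds hkeep]
    · rw [pvStepA_keep cs (texts, out) item hkeep, pvAltTexts_keep item ds hkeep]
      by_cases hlen : cs ≤ ((texts ++ [pvItemText item]).length : Int)
      · have hlen' : cs ≤ ((texts.length : Int) + 1) := by simpa using hlen
        rw [if_pos hlen]
        simp only [pvChunksFrom, if_pos hlen']
        rw [ih]
        simp
      · have hlen' : ¬ cs ≤ ((texts.length : Int) + 1) := by simpa using hlen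
        rw [if_neg hlen]
        simp only [pvChunksFrom, if_neg hlen']
        exact ih _ _

theorem pvChunksFrom_altLoop (cs : Int) (hcs : 0 < cs) (l texts : List String)
    (hlt : (texts.length : Int) < cs) :
    pvChunksFrom cs texts l = pvAltLoop cs (texts ++ l) := by
  induction l generalizing texts with
  | nil =>
    simp only [pvChunksFrom, List.append_nil]
    by_cases hnil : texts = []
    · rw [if_pos hnil, hnil, pvAltLoop_eq]; simp
    · rw [if_neg hnil, pvAltLoop_eq, if_neg hnil, if_neg (by omega : ¬ cs ≤ 0)]
      have h1 : PySem.List.slice texts none (some cs) = texts := by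
        rw [PySem.List.slice_to texts (by omega : (0:Int) ≤ cs)]
        exact List.take_of_length_le (by omega)
      have h2 : PySem.List.slice texts (some cs) none = ([] : List String) := by
        rw [PySem.List.slice_from texts (by omega : (0:Int) ≤ cs)]
        exact List.drop_eq_nil_of_le (by omega)
      rw [h1, h2, pvAltLoop_eq]; simp
  | cons t l ih =>
    simp only [pvChunksFrom]
    by_cases hfull : cs ≤ ((texts.length : Int) + 1)
    · rw [if_pos hfull, ih [] (by simpa using hcs), List.nil_append]
      have hrw : texts ++ t :: l = (texts ++ [t]) ++ l := by simp
      have hne : (texts ++ [t]) ++ l ≠ [] := by simp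
      have hlenfull : (texts ++ [t]).length = cs.toNat := by simp; omega
      have h1 : PySem.List.slice ((texts ++ [t]) ++ l) none (some cs) = texts ++ [t] := by
        rw [PySem.List.slice_to ((texts ++ [t]) ++ l) (by omega : (0:Int) ≤ cs)]
        rw [List.take_append_of_le_length (by omega)]
        exact List.take_of_length_le (by omega)
      have h2 : PySem.List.slice ((texts ++ [t]) ++ l) (some cs) none = l := by
        rw [PySem.List.slice_from ((texts ++ [t]) ++ l) (by omega : (0:Int) ≤ cs)]
        rw [← hlenfull, List.drop_left]
      conv_rhs => rw [hrw, pvAltLoop_eq]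
      rw [if_neg hne, if_neg (by omega : ¬ cs ≤ 0), h1, h2]
    · rw [if_neg hfull, ih (texts ++ [t]) (by simp; omega)]
      simp

theorem pvAltTexts_blank (ds : List (List (String × String)))
    (h : ∀ item ∈ ds, PySem.Str.strip (pvItemText item) = "") : pvAltTexts ds = [] := by
  simp only [pvAltTexts, List.filterMap_eq_nil_iff]
  intro item hm
  simp [h item hm]

-- ===== VERDICT (by name: the statement is the Claim_ definition above) =====
theorem chunked_text_generator_spec : Claim_equal_chunked_text_generator := by
  intro ds cs _ hpre
  unfold Spec_chunked_text_generator
  show pvFinish (ds.foldl (pvStepA cs) ([], [])) = pvAltLoop cs (pvAltTexts ds)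
  rw [pvFoldA_chunksFrom, List.nil_append]
  rcases hpre.1 with hcs | hblank
  · rw [pvChunksFrom_altLoop cs hcs (pvAltTexts ds) [] (by simpa using hcs), List.nil_append]
  · rw [pvAltTexts_blank ds (fun item hm => hblank item hm), pvAltLoop_eq]
    simp [pvChunksFrom]
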